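-- pv_equiv track=rewrite | github.com/Bal1oon/codingTestStudy | Programmers/Level_2/주식가격.py | solution
-- ===== SOURCE A (Python) =====
-- def solution(prices):
--     answer = [0] * len(prices)
--     stack = []
--     for i in range(len(prices)):
--         while stack and prices[stack[-1]] > prices[i]:
--             j = stack.pop()
--             answer[j] = i - j
--         stack.append(i)
--
--     while stack:
--         j = stack.pop()
--         answer[j] = len(prices) - j - 1
--     return answer
-- ===== SOURCE B (Python) =====
-- def solution(prices):
--     n = len(prices)
--     answer = []
--     for i in range(n):
--         d = n - 1 - i
--         for j in range(i + 1, n):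
--             if prices[j] < prices[i]:
--                 d = j - i
--                 break
--         answer.append(d)
--     return answer
-- ===== Notes on version B (the rewrite author's own statement) =====
-- stated objective: simpler
-- what changed: Replaced the index-stack bookkeeping (pop/push with a second fix-up loop) by a direct per-index forward scan for the first strictly smaller price, with the no-drop default n-1-i.
import Mathlib
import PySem

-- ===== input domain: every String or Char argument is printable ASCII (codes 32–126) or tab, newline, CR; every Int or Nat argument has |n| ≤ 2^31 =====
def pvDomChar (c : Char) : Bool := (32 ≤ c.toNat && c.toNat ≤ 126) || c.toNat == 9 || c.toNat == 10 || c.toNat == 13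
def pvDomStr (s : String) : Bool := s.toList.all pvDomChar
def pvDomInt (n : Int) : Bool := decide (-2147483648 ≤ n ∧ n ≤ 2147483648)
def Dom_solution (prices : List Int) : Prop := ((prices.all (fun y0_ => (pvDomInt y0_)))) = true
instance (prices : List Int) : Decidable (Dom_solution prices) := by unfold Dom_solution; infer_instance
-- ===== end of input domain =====

-- B replaces A's index stack by a per-index forward scan for the first strictly smaller price (simpler, not faster).

-- ===== PORT A =====
-- the inner 'while stack and prices[stack[-1]] > prices[i]' loop (stack head = top)
def solPop (prices : List Int) (i : Nat) : List Nat → List Int → List Nat × List Int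
  | [], ans => ([], ans)
  | j :: rest, ans =>
    if prices.getD j 0 > prices.getD i 0 then
      solPop prices i rest (ans.set j ((i : Int) - (j : Int)))
    else (j :: rest, ans)

def solution (prices : List Int) : List Int :=
  let n := prices.length
  let st := (List.range n).foldl
    (fun (s : List Int × List Nat) i =>
      let r := solPop prices i s.2 s.1
      (r.2, i :: r.1))
    (List.replicate n 0, [])
  st.2.foldl (fun a j => a.set j ((n : Int) - (j : Int) - 1)) st.1

-- ===== PORT B =====
-- the inner 'for j in range(i+1, n): if prices[j] < prices[i]: d = j - i; break' loop
def altScan (prices : List Int) (pi : Int) (i : Nat) (d : Int) : List Nat → Int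
  | [] => d
  | j :: rest => if prices.getD j 0 < pi then (j : Int) - (i : Int) else altScan prices pi i d rest

def solution_alt (prices : List Int) : List Int :=
  let n := prices.length
  (List.range n).map (fun i =>
    altScan prices (prices.getD i 0) i ((n : Int) - 1 - (i : Int)) (List.range' (i + 1) (n - (i + 1))))

-- ===== PRECONDITION & SPEC =====
def Spec_solution (prices : List Int) (out : List Int) : Prop := out = solution_alt prices
instance (prices : List Int) (out : List Int) : Decidable (Spec_solution prices out) := by unfold Spec_solution; infer_instance

-- ===== CLAIM (what is proved, stated in full; the proofs are below) =====
def Claim_equal_solution : Prop := ∀ (prices : List Int), Dom_solution prices → Spec_solution prices (solution prices)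

-- ===== LEMMAS AND PROOFS =====

-- common target: the first j in (i, n) with prices[j] < prices[i], else n - 1 - i
def ansSpec (prices : List Int) (i : Nat) : Int :=
  match (List.range' (i + 1) (prices.length - (i + 1))).find?
      (fun j => decide (prices.getD j 0 < prices.getD i 0)) with
  | some j => (j : Int) - (i : Int)
  | none => (prices.length : Int) - 1 - (i : Int)

-- the stack contents after processing indices 0..m-1, head = top
def stSpec (prices : List Int) (m : Nat) : List Nat :=
  ((List.range m).filter
    (fun j => decide (∀ k, k < m → j < k → prices.getD j 0 ≤ prices.getD k 0))).reverse

theorem altScan_eq_find (prices : List Int) (pi : Int) (i : Nat) (d : Int) (l : List Nat) :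
    altScan prices pi i d l =
      match l.find? (fun j => decide (prices.getD j 0 < pi)) with
      | some j => (j : Int) - (i : Int)
      | none => d := by
  induction l with
  | nil => simp [altScan]
  | cons j rest ih =>
    rw [List.find?_cons]
    by_cases h : prices.getD j 0 < pi
    · simp only [altScan, if_pos h, decide_eq_true h]
    · simp only [altScan, if_neg h, decide_eq_false h]
      exact ih

theorem solution_alt_eq_map (prices : List Int) :
    solution_alt prices = (List.range prices.length).map (ansSpec prices) := by
  unfold solution_alt
  refine List.map_congr_left (fun i hi => ?_)
  rw [altScan_eq_find]
  rfl

theorem stSpec_mem {prices : List Int} {m j : Nat} :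
    j ∈ stSpec prices m ↔
      j < m ∧ ∀ k, k < m → j < k → prices.getD j 0 ≤ prices.getD k 0 := by
  simp [stSpec, List.mem_filter, List.mem_range]

theorem stSpec_pairwise (prices : List Int) (m : Nat) :
    (stSpec prices m).Pairwise (fun a b => prices.getD b 0 ≤ prices.getD a 0) := by
  have h1 : (stSpec prices m).Pairwise (fun a b => b < a) := by
    rw [stSpec, List.pairwise_reverse]
    exact (List.pairwise_lt_range).filter _
  refine List.Pairwise.imp_of_mem (fun {a b} ha hb hab => ?_) h1
  exact (stSpec_mem.mp hb).2 a (stSpec_mem.mp ha).1 hab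

theorem stSpec_succ (prices : List Int) (m : Nat) :
    stSpec prices (m + 1) =
      m :: (stSpec prices m).filter (fun j => decide (prices.getD j 0 ≤ prices.getD m 0)) := by
  have hPm : decide (∀ k, k < m + 1 → m < k → prices.getD m 0 ≤ prices.getD k 0) = true := by
    simp only [decide_eq_true_eq]
    omega
  have hfilt : (List.range m).filter
      (fun j => decide (∀ k, k < m + 1 → j < k → prices.getD j 0 ≤ prices.getD k 0)) =
      (((List.range m).filter
        (fun j => decide (∀ k, k < m → j < k → prices.getD j 0 ≤ prices.getD k 0))).filter
        (fun j => decide (prices.getD j 0 ≤ prices.getD m 0))) := by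
    rw [List.filter_filter]
    refine List.filter_congr fun j hj => ?_
    have hjm : j < m := List.mem_range.mp hj
    have hiff : (∀ k, k < m + 1 → j < k → prices.getD j 0 ≤ prices.getD k 0) ↔
        (prices.getD j 0 ≤ prices.getD m 0 ∧
          ∀ k, k < m → j < k → prices.getD j 0 ≤ prices.getD k 0) := by
      constructor
      · intro h
        exact ⟨h m (by omega) hjm, fun k hk hjk => h k (by omega) hjk⟩
      · rintro ⟨h2, h1⟩ k hk hjk
        rcases Nat.lt_succ_iff_lt_or_eq.mp hk with h | h
        · exact h1 k h hjk
        · subst h; exact h2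
    rw [decide_eq_decide.mpr hiff, Bool.decide_and]
  have hsingle : List.filter
      (fun j => decide (∀ k, k < m + 1 → j < k → prices.getD j 0 ≤ prices.getD k 0)) [m] = [m] := by
    rw [List.filter_singleton]
    simp only [hPm]
    rfl
  unfold stSpec
  rw [List.range_succ, List.filter_append, List.reverse_append, hfilt, List.filter_reverse, hsingle]
  simp

-- popping: on a price-nonincreasing stack, solPop is filtering
theorem solPop_spec (prices : List Int) (i : Nat) :
    ∀ (l : List Nat) (a : List Int),
      l.Pairwise (fun x y => prices.getD y 0 ≤ prices.getD x 0) →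
      (solPop prices i l a).1 = l.filter (fun j => decide (prices.getD j 0 ≤ prices.getD i 0)) ∧
      (solPop prices i l a).2 =
        (l.filter (fun j => decide (prices.getD i 0 < prices.getD j 0))).foldl
          (fun acc j => acc.set j ((i : Int) - (j : Int))) a := by
  intro l
  induction l with
  | nil => intro a _; simp [solPop]
  | cons j rest ih =>
    intro a hp
    rw [List.pairwise_cons] at hp
    by_cases h : prices.getD j 0 > prices.getD i 0
    · obtain ⟨ih1, ih2⟩ := ih (a.set j ((i : Int) - (j : Int))) hp.2
      have hnle : ¬ prices.getD j 0 ≤ prices.getD i 0 := by omega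
      refine ⟨?_, ?_⟩
      · simp only [solPop, if_pos h]
        rw [ih1, List.filter_cons_of_neg (by simpa using hnle)]
      · simp only [solPop, if_pos h]
        rw [ih2, List.filter_cons_of_pos (by simpa using h), List.foldl_cons]
    · have hle : prices.getD j 0 ≤ prices.getD i 0 := by omega
      have hall : ∀ x ∈ j :: rest, prices.getD x 0 ≤ prices.getD i 0 := by
        intro x hx
        rcases List.mem_cons.mp hx with rfl | hx
        · exact hle
        · exact le_trans (hp.1 x hx) hle
      refine ⟨?_, ?_⟩
      · simp only [solPop, if_neg h]
        exact (List.filter_eq_self.mpr (fun x hx => decide_eq_true (hall x hx))).symm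
      · simp only [solPop, if_neg h]
        have hnil : (j :: rest).filter (fun x => decide (prices.getD i 0 < prices.getD x 0)) = [] :=
          List.filter_eq_nil_iff.mpr (fun x hx => by
            simp only [decide_eq_true_eq, not_lt]
            exact hall x hx)
        rw [hnil, List.foldl_nil]

-- setting distinct cells: foldl of set, value a function of the index
theorem foldl_set_getD (f : Nat → Int) :
    ∀ (s : List Nat) (a : List Int), (∀ j ∈ s, j < a.length) → ∀ (j : Nat),
      (s.foldl (fun acc j => acc.set j (f j)) a).getD j 0 =
        if j ∈ s then f j else a.getD j 0 := by
  intro s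
  induction s with
  | nil => intro a _ j; simp
  | cons j0 rest ih =>
    intro a hlen j
    have hj0 : j0 < a.length := hlen j0 (by simp)
    have hlen' : ∀ x ∈ rest, x < (a.set j0 (f j0)).length := by
      intro x hx; rw [List.length_set]; exact hlen x (by simp [hx])
    rw [List.foldl_cons, ih _ hlen' j]
    by_cases hr : j ∈ rest
    · simp [hr]
    · by_cases he : j = j0
      · subst he
        simp [hr, List.getD_eq_getElem?_getD, List.getElem?_set_self (by omega)]
      · rw [if_neg hr, if_neg (show j ∉ j0 :: rest by simp [hr, he]),
          List.getD_eq_getElem?_getD, List.getD_eq_getElem?_getD,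
          List.getElem?_set_ne (by omega : j0 ≠ j)]

theorem foldl_set_length (f : Nat → Int) :
    ∀ (s : List Nat) (a : List Int),
      (s.foldl (fun acc j => acc.set j (f j)) a).length = a.length := by
  intro s
  induction s with
  | nil => intro a; rfl
  | cons j0 rest ih => intro a; rw [List.foldl_cons, ih]; simp

-- first-drop characterisations of ansSpec
theorem ansSpec_of_drop (prices : List Int) (j m : Nat) (hm : m < prices.length)
    (hjm : j < m)
    (hgood : ∀ k, k < m → j < k → prices.getD j 0 ≤ prices.getD k 0)
    (hdrop : prices.getD m 0 < prices.getD j 0) :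
    ansSpec prices j = (m : Int) - (j : Int) := by
  unfold ansSpec
  have hsplit : List.range' (j + 1) (prices.length - (j + 1)) =
      List.range' (j + 1) (m - (j + 1)) ++ List.range' m (prices.length - m) := by
    have e : prices.length - (j + 1) = (m - (j + 1)) + (prices.length - m) := by omega
    have h := (List.range'_append_1 (s := j + 1) (m := m - (j + 1)) (n := prices.length - m)).symm
    rw [show j + 1 + (m - (j + 1)) = m by omega] at h
    rw [e]
    exact h
  rw [hsplit, List.find?_append]
  have h1 : (List.range' (j + 1) (m - (j + 1))).find?
      (fun k => decide (prices.getD k 0 < prices.getD j 0)) = none := by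
    rw [List.find?_eq_none]
    intro k hk
    have := List.mem_range'_1.mp hk
    simp only [decide_eq_true_eq, not_lt]
    exact hgood k (by omega) (by omega)
  rw [h1]
  have h2 : List.range' m (prices.length - m) = m :: List.range' (m + 1) (prices.length - m - 1) := by
    have e : prices.length - m = (prices.length - m - 1) + 1 := by omega
    calc List.range' m (prices.length - m)
        = List.range' m ((prices.length - m - 1) + 1) := by rw [← e]
      _ = m :: List.range' (m + 1) (prices.length - m - 1) := List.range'_succ ..
  rw [h2, List.find?_cons]
  simp only [decide_eq_true hdrop]
  rfl

theorem ansSpec_of_nodrop (prices : List Int) (j : Nat)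
    (hgood : ∀ k, k < prices.length → j < k → prices.getD j 0 ≤ prices.getD k 0) :
    ansSpec prices j = (prices.length : Int) - 1 - (j : Int) := by
  unfold ansSpec
  have h1 : (List.range' (j + 1) (prices.length - (j + 1))).find?
      (fun k => decide (prices.getD k 0 < prices.getD j 0)) = none := by
    rw [List.find?_eq_none]
    intro k hk
    have := List.mem_range'_1.mp hk
    simp only [decide_eq_true_eq, not_lt]
    exact hgood k (by omega) (by omega)
  rw [h1]

-- main loop invariant
theorem loop_inv (prices : List Int) :
    ∀ m, m ≤ prices.length →
      let st := (List.range m).foldl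
        (fun (s : List Int × List Nat) i =>
          let r := solPop prices i s.2 s.1
          (r.2, i :: r.1))
        (List.replicate prices.length 0, [])
      st.2 = stSpec prices m ∧ st.1.length = prices.length ∧
        ∀ j, j < prices.length →
          st.1.getD j 0 = if j < m ∧ j ∉ stSpec prices m then ansSpec prices j else 0 := by
  intro m
  induction m with
  | zero =>
    intro _
    refine ⟨by simp [stSpec], by simp, ?_⟩
    intro j hj
    simp [List.getD_eq_getElem?_getD, hj]
  | succ m ih =>
    intro hm1
    have hm : m ≤ prices.length := by omega
    obtain ⟨hst, hlen, hans⟩ := ih hm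
    simp only [List.range_succ, List.foldl_append, List.foldl_cons, List.foldl_nil]
    set st := (List.range m).foldl
      (fun (s : List Int × List Nat) i =>
        let r := solPop prices i s.2 s.1
        (r.2, i :: r.1))
      (List.replicate prices.length 0, []) with hstdef
    have hpw : st.2.Pairwise (fun x y => prices.getD y 0 ≤ prices.getD x 0) := by
      rw [hst]; exact stSpec_pairwise prices m
    obtain ⟨hp1, hp2⟩ := solPop_spec prices m st.2 st.1 hpw
    have hpop : (st.2.filter (fun j => decide (prices.getD m 0 < prices.getD j 0))) =
        (stSpec prices m).filter (fun j => decide (prices.getD m 0 < prices.getD j 0)) := by rw [hst]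
    refine ⟨?_, ?_, ?_⟩
    · show m :: (solPop prices m st.2 st.1).1 = stSpec prices (m + 1)
      rw [hp1, hst, stSpec_succ]
    · show (solPop prices m st.2 st.1).2.length = prices.length
      rw [hp2, foldl_set_length, hlen]
    · show ∀ j, j < prices.length → (solPop prices m st.2 st.1).2.getD j 0 = _
      intro j hj
      have hsub : ∀ x ∈ st.2.filter (fun j => decide (prices.getD m 0 < prices.getD j 0)),
          x < st.1.length := by
        intro x hx
        have hx' := List.mem_of_mem_filter hx
        rw [hst] at hx'
        have := (stSpec_mem.mp hx').1
        omega
      rw [hp2, foldl_set_getD _ _ _ hsub j, hpop]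
      by_cases hjpop : j ∈ (stSpec prices m).filter (fun j => decide (prices.getD m 0 < prices.getD j 0))
      · -- j popped at step m: first drop is m
        rw [if_pos hjpop]
        rw [List.mem_filter] at hjpop
        obtain ⟨hjmem, hjlt⟩ := hjpop
        obtain ⟨hjm, hjgood⟩ := stSpec_mem.mp hjmem
        have hdrop : prices.getD m 0 < prices.getD j 0 := by simpa using hjlt
        have hval := ansSpec_of_drop prices j m (by omega) hjm hjgood hdrop
        have hnot : j ∉ stSpec prices (m + 1) := by
          intro hmem
          have := (stSpec_mem.mp hmem).2 m (by omega) hjm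
          omega
        rw [if_pos (show j < m + 1 ∧ j ∉ stSpec prices (m + 1) from ⟨by omega, hnot⟩), hval]
      · rw [if_neg hjpop, hans j hj]
        by_cases hjin : j ∈ stSpec prices (m + 1)
        · rw [if_neg (show ¬(j < m + 1 ∧ j ∉ stSpec prices (m + 1)) by simp [hjin])]
          rcases stSpec_mem.mp hjin with ⟨hjm1, hjgood⟩
          by_cases hjm : j < m
          · have hjmem : j ∈ stSpec prices m :=
              stSpec_mem.mpr ⟨hjm, fun k hk hjk => hjgood k (by omega) hjk⟩
            rw [if_neg (show ¬(j < m ∧ j ∉ stSpec prices m) by simp [hjmem])]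
          · rw [if_neg (show ¬(j < m ∧ j ∉ stSpec prices m) from fun h => hjm h.1)]
        · by_cases hjm : j < m
          · -- j < m, answered before step m
            have hjnot : j ∉ stSpec prices m := by
              intro hmem
              have hle : prices.getD j 0 ≤ prices.getD m 0 := by
                by_contra hgt
                exact hjpop (List.mem_filter.mpr ⟨hmem, by simp only [decide_eq_true_eq]; omega⟩)
              apply hjin
              rw [stSpec_mem]
              obtain ⟨_, hgood⟩ := stSpec_mem.mp hmem
              refine ⟨by omega, fun k hk hjk => ?_⟩
              rcases Nat.lt_succ_iff_lt_or_eq.mp hk with h | h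
              · exact hgood k h hjk
              · subst h; exact hle
            rw [if_pos (show j < m ∧ j ∉ stSpec prices m from ⟨hjm, hjnot⟩),
                if_pos (show j < m + 1 ∧ j ∉ stSpec prices (m + 1) from ⟨by omega, hjin⟩)]
          · -- j ≥ m + 1 (j = m impossible: m ∈ stSpec (m+1)); untouched 0
            have hjm1 : ¬ j < m + 1 := by
              intro h
              have hje : j = m := by omega
              subst hje
              exact hjin (stSpec_mem.mpr ⟨by omega, fun k hk hjk => by omega⟩)
            rw [if_neg (show ¬(j < m ∧ j ∉ stSpec prices m) from fun h => hjm h.1),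
                if_neg (show ¬(j < m + 1 ∧ j ∉ stSpec prices (m + 1)) from fun h => hjm1 h.1)]

theorem solution_eq_map (prices : List Int) :
    solution prices = (List.range prices.length).map (ansSpec prices) := by
  unfold solution
  obtain ⟨hst, hlen, hans⟩ := loop_inv prices prices.length (le_refl _)
  set st := (List.range prices.length).foldl
    (fun (s : List Int × List Nat) i =>
      let r := solPop prices i s.2 s.1
      (r.2, i :: r.1))
    (List.replicate prices.length 0, []) with hstdef
  have hsub : ∀ x ∈ st.2, x < st.1.length := by
    intro x hx
    rw [hst] at hx
    have := (stSpec_mem.mp hx).1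
    omega
  have hlenfin : (st.2.foldl (fun a j => a.set j ((prices.length : Int) - (j : Int) - 1)) st.1).length
      = prices.length := by
    have := foldl_set_length (fun j => (prices.length : Int) - (j : Int) - 1) st.2 st.1
    rw [this, hlen]
  apply List.ext_getElem
  · rw [hlenfin]; simp
  · intro j h1 h2
    have hj : j < prices.length := by rwa [hlenfin] at h1
    have hgetD := foldl_set_getD (fun j => (prices.length : Int) - (j : Int) - 1) st.2 st.1 hsub j
    have hL : (st.2.foldl (fun a j => a.set j ((prices.length : Int) - (j : Int) - 1)) st.1)[j] =
        (st.2.foldl (fun a j => a.set j ((prices.length : Int) - (j : Int) - 1)) st.1).getD j 0 := by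
      rw [List.getD_eq_getElem?_getD, List.getElem?_eq_getElem h1]; rfl
    rw [hL, hgetD]
    have hR : ((List.range prices.length).map (ansSpec prices))[j] = ansSpec prices j := by
      simp
    rw [hR]
    by_cases hmem : j ∈ st.2
    · rw [if_pos hmem]
      rw [hst] at hmem
      obtain ⟨_, hgood⟩ := stSpec_mem.mp hmem
      rw [ansSpec_of_nodrop prices j hgood]
      ring
    · rw [if_neg hmem, hans j hj]
      rw [hst] at hmem
      rw [if_pos ⟨hj, hmem⟩]

-- ===== VERDICT (by name: the statement is the Claim_ definition above) =====
theorem solution_spec : Claim_equal_solution := by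
  intro prices _
  show solution prices = solution_alt prices
  rw [solution_eq_map, solution_alt_eq_map]
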